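-- pv_equiv track=rewrite | github.com/wangmu0115/MyPy3 | _interpreter/lexer.py | _read_identifier
-- ===== SOURCE A (Python) =====
-- def _read_identifier(s: str, start_position: int) -> str:
--     end_position = start_position + 1
--     while end_position < len(s):
--         ch = s[end_position]
--         if _is_letter(ch) or _is_digit(ch):
--             end_position += 1
--         else:
--             break
--     return s[start_position:end_position]
--
-- def _is_letter(ch: str) -> bool:
--     # ord("a") = 97, ord("z") = 122, ord("A") = 65, ord("Z") = 90, ord("_") = 95
--     ordinal = ord(ch)
--     return (ordinal >= 65 and ordinal <= 90) or (ordinal >= 97 and ordinal <= 122) or ordinal == 95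
--
-- def _is_digit(ch: str) -> bool:
--     return ch in list("0123456789")
-- ===== SOURCE B (Python) =====
-- _ID_CHARS = "ABCDEFGHIJKLMNOPQRSTUVWXYZabcdefghijklmnopqrstuvwxyz0123456789_"
--
-- def _read_identifier(s: str, start_position: int) -> str:
--     tail = s[start_position + 1:]
--     matched = len(tail) - len(tail.lstrip(_ID_CHARS))
--     return s[start_position:start_position + 1 + matched]
-- ===== Notes on version B (the rewrite author's own statement) =====
-- stated objective: faster
-- what changed: B replaces A's index-by-index while loop with per-character class helpers by a single slice plus str.lstrip with an identifier-character set, computing the matched length arithmetically.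
-- outside the precondition, e.g. on _read_identifier('abc', -2): A returns 'bc', B returns ''; on _read_identifier('ab', -3): A returns 'ab', B returns ''
import Mathlib
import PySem

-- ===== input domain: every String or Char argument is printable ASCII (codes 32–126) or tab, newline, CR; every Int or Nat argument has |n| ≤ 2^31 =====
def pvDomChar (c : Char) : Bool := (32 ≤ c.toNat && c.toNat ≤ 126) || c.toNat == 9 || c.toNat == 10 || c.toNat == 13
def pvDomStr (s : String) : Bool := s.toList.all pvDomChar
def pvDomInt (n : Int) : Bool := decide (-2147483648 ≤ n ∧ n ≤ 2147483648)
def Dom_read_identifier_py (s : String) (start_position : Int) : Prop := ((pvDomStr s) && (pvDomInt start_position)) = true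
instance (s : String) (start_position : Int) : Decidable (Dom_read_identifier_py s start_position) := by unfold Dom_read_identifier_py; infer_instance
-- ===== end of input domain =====

-- B replaces A's index-by-index scanning loop by a slice + lstrip(ID_CHARS) length computation (objective: faster by constant factor, measured).
-- Pre_ restricts to nonnegative start_position, the lexer's natural domain; on negative starts A's value
-- comes from Python's negative-index wraparound (or A raises IndexError for very negative starts), which
-- B's slice-based arithmetic does not reproduce.


-- ===== PORT A =====
def pvIsLetter (ch : Char) : Bool :=
  (65 ≤ ch.toNat && ch.toNat ≤ 90) || (97 ≤ ch.toNat && ch.toNat ≤ 122) || ch.toNat == 95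

def pvIsDigit (ch : Char) : Bool :=
  ("0123456789".toList).contains ch

-- the while loop; fuel = number of remaining positions before len(s), exact for this loop
def pvALoop (cs : List Char) (endPos : Int) (fuel : Nat) : Int :=
  match fuel with
  | 0 => endPos
  | f + 1 =>
    if endPos < (cs.length : Int) then
      match PySem.List.pyGet? cs endPos with
      | some ch => if pvIsLetter ch || pvIsDigit ch then pvALoop cs (endPos + 1) f else endPos
      | none => endPos  -- IndexError in Python; excluded by Pre_
    else endPos

def read_identifier_py (s : String) (start_position : Int) : String :=
  let cs := s.toList
  let endPos := pvALoop cs (start_position + 1) (((cs.length : Int) - (start_position + 1)).toNat)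
  String.mk (PySem.List.slice cs (some start_position) (some endPos))

-- ===== PORT B =====
def pvIdChars : List Char := "ABCDEFGHIJKLMNOPQRSTUVWXYZabcdefghijklmnopqrstuvwxyz0123456789_".toList

def read_identifier_py_alt (s : String) (start_position : Int) : String :=
  let cs := s.toList
  let tail := PySem.List.slice cs (some (start_position + 1)) none
  -- tail.lstrip(_ID_CHARS): drop the leading characters belonging to the set (hand port, exact)
  let stripped := tail.dropWhile (fun c => pvIdChars.contains c)
  let matched : Int := (tail.length : Int) - (stripped.length : Int)
  String.mk (PySem.List.slice cs (some start_position) (some (start_position + 1 + matched)))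

-- ===== PRECONDITION & SPEC =====
-- Pre_ keeps the lexer's natural domain 0 ≤ start_position: on negative starts A either raises IndexError
-- (start_position + 1 < -len(s)) or returns a value produced by negative-index wraparound, which is not
-- what B's slice arithmetic yields there.
def Pre_read_identifier_py (s : String) (start_position : Int) : Prop := 0 ≤ start_position
instance (s : String) (start_position : Int) : Decidable (Pre_read_identifier_py s start_position) := by unfold Pre_read_identifier_py; infer_instance
def pvWitness_read_identifier_py : String × Int := ("ab1 x", 0)

def Spec_read_identifier_py (s : String) (start_position : Int) (out : String) : Prop := out = read_identifier_py_alt s start_position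
instance (s : String) (start_position : Int) (out : String) : Decidable (Spec_read_identifier_py s start_position out) := by unfold Spec_read_identifier_py; infer_instance

-- ===== CLAIM (what is proved, stated in full; the proofs are below) =====
def Claim_equal_read_identifier_py : Prop := ∀ (s : String) (start_position : Int), Dom_read_identifier_py s start_position → Pre_read_identifier_py s start_position → Spec_read_identifier_py s start_position (read_identifier_py s start_position)

-- ===== LEMMAS AND PROOFS =====


-- Char.toNat determines the character
lemma pv_char_eq_of_toNat (a b : Char) (h : a.toNat = b.toNat) : a = b := by
  apply Char.ext; exact UInt32.toNat_inj.mp h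

lemma pv_mem_iff_nat (l : List Char) (c : Char) : c ∈ l ↔ c.toNat ∈ l.map Char.toNat := by
  constructor
  · exact fun h => List.mem_map_of_mem h
  · intro h
    obtain ⟨a, ha, hEq⟩ := List.mem_map.mp h
    rwa [pv_char_eq_of_toNat a c hEq] at ha

-- the two character classifications agree
lemma pv_idchars_eq (c : Char) : pvIdChars.contains c = (pvIsLetter c || pvIsDigit c) := by
  rw [Bool.eq_iff_iff]
  rw [List.contains_iff_mem, pv_mem_iff_nat]
  rw [show pvIdChars.map Char.toNat = [65, 66, 67, 68, 69, 70, 71, 72, 73, 74, 75, 76, 77, 78, 79, 80, 81, 82, 83, 84, 85, 86, 87, 88, 89, 90, 97, 98, 99, 100, 101, 102, 103, 104, 105, 106, 107, 108, 109, 110, 111, 112, 113, 114, 115, 116, 117, 118, 119, 120, 121, 122, 48, 49, 50, 51, 52, 53, 54, 55, 56, 57, 95] from by decide]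
  have hd : pvIsDigit c = true ↔ c.toNat ∈ (("0123456789".toList).map Char.toNat) := by
    rw [pvIsDigit, List.contains_iff_mem, pv_mem_iff_nat]
  rw [show ("0123456789".toList).map Char.toNat = [48, 49, 50, 51, 52, 53, 54, 55, 56, 57] from by decide] at hd
  simp only [pvIsLetter, Bool.or_eq_true, Bool.and_eq_true, decide_eq_true_eq, beq_iff_eq, hd,
    List.mem_cons, List.not_mem_nil, or_false]
  omega

-- A's while loop computes e + (length of the identifier-character prefix of the tail from e)
lemma pvALoop_eq (cs : List Char) (fuel : Nat) : ∀ (e : Int), 0 ≤ e →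
    fuel = ((cs.length : Int) - e).toNat →
    pvALoop cs e fuel = e + (((cs.drop e.toNat).takeWhile (fun c => pvIsLetter c || pvIsDigit c)).length : Int) := by
  induction fuel with
  | zero =>
    intro e he hf
    have hlen : cs.length ≤ e.toNat := by omega
    simp [pvALoop, List.drop_eq_nil_of_le hlen]
  | succ f ih =>
    intro e he hf
    have hlt : e < (cs.length : Int) := by omega
    have hlt' : e.toNat < cs.length := by omega
    have hget : PySem.List.pyGet? cs e = some cs[e.toNat] := by
      have h := PySem.List.pyGet?_natCast cs e.toNat
      rw [Int.toNat_of_nonneg he] at h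
      rw [h, List.getElem?_eq_getElem hlt']
    rw [pvALoop, if_pos hlt, hget]
    rw [List.drop_eq_getElem_cons hlt', List.takeWhile_cons]
    by_cases hp : (pvIsLetter cs[e.toNat] || pvIsDigit cs[e.toNat]) = true
    · rw [if_pos hp]
      simp only [hp, ih (e + 1) (by omega) (by omega), List.length_cons]
      have : (e + 1).toNat = e.toNat + 1 := by omega
      rw [this]
      push_cast
      ring
    · rw [if_neg hp]
      simp only [Bool.not_eq_true] at hp
      simp [hp]

-- ===== VERDICT (by name: the statement is the Claim_ definition above) =====

theorem read_identifier_py_spec : Claim_equal_read_identifier_py := by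
  intro s sp _ hpre
  unfold Spec_read_identifier_py
  have hpre' : (0:Int) ≤ sp := hpre
  simp only [read_identifier_py, read_identifier_py_alt]
  rw [PySem.List.slice_from s.toList (by omega : (0:Int) ≤ sp + 1)]
  have hfun : (fun c => pvIdChars.contains c) = (fun c => pvIsLetter c || pvIsDigit c) :=
    funext fun c => pv_idchars_eq c
  rw [hfun]
  rw [pvALoop_eq s.toList (((s.toList.length : Int) - (sp + 1)).toNat) (sp + 1) (by omega) rfl]
  set t := s.toList.drop (sp + 1).toNat with ht
  have hsplit : (t.takeWhile (fun c => pvIsLetter c || pvIsDigit c)).length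
      + (t.dropWhile (fun c => pvIsLetter c || pvIsDigit c)).length = t.length := by
    rw [← List.length_append, List.takeWhile_append_dropWhile]
  have harith : sp + 1 + ((t.takeWhile (fun c => pvIsLetter c || pvIsDigit c)).length : Int)
      = sp + 1 + (((t.length : Int)) - ((t.dropWhile (fun c => pvIsLetter c || pvIsDigit c)).length : Int)) := by
    omega
  rw [harith]
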